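-- pv_equiv track=rewrite | github.com/CrossLangNV/DGFISMA_term_extraction | user_scripts/generate_training_data_from_cas.py | annotations_to_tags
-- ===== SOURCE A (Python) =====
-- from typing import List, Tuple, Set
--
-- def annotations_to_tags( sentence:str, defined:List[ Tuple[ int , int ] ] , tag_begin="★", tag_end="☆"  )-> str:
--
--     '''
--     Given a sentence, and a list of Tuples representing offsets of token annnotations for defined terms, this function converts the sentence to a sentence with annotations that can be used as input to the generate_training_data.py user script.
--     '''
--
--     sentence_new=''
--
--     for i in range( len(defined) ):
--         if i==0:
--             sentence_new=sentence[ :defined[i][0] ]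
--         sentence_new=sentence_new + f" {tag_begin} " + sentence[ defined[i][0]:defined[i][1] ] + f" {tag_end} "
--         if i<len(defined)-1:
--             sentence_new=sentence_new + sentence[ defined[i][1] : defined[i+1][0] ]
--         else:
--             sentence_new=sentence_new + sentence[ defined[i][1] :]
--
--     return sentence_new
-- ===== SOURCE B (Python) =====
-- from typing import List, Tuple
--
-- def annotations_to_tags(sentence: str, defined: List[Tuple[int, int]], tag_begin="★", tag_end="☆") -> str:
--     # Build the result back-to-front: walk the annotations right-to-left,
--     # prepending each tagged chunk (and the gap to the previously handled
--     # annotation's start) onto a growing suffix.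
--     if not defined:
--         return ''
--     suffix = sentence[defined[-1][1]:]
--     next_start = None
--     for start, end in reversed(defined):
--         if next_start is not None:
--             suffix = sentence[end:next_start] + suffix
--         suffix = f" {tag_begin} " + sentence[start:end] + f" {tag_end} " + suffix
--         next_start = start
--     return sentence[:defined[0][0]] + suffix
-- ===== Notes on version B (the rewrite author's own statement) =====
-- stated objective: alternative
-- what changed: Replaces A's forward indexed loop (with its i==0 prefix branch and defined[i+1] look-ahead) by a right-to-left traversal of the annotations that builds the output back-to-front, prepending each tagged chunk and gap onto a suffix accumulator keyed by the start of the annotation handled just before.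
import Mathlib
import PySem

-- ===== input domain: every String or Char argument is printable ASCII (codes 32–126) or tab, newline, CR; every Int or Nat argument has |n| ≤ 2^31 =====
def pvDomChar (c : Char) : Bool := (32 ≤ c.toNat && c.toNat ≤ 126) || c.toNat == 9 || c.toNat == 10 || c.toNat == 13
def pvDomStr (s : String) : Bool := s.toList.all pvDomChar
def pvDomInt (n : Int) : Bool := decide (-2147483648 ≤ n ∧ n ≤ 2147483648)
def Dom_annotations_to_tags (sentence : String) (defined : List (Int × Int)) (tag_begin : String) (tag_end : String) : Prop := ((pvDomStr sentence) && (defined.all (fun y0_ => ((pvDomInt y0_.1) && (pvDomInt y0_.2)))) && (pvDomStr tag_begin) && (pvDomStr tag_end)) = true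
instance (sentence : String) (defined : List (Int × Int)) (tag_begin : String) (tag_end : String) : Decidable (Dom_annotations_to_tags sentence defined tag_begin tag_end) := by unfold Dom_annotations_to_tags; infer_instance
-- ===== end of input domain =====

-- B replaces A's forward indexed loop (i==0 prefix branch, defined[i+1] look-ahead) by a
-- right-to-left traversal that builds the output back-to-front onto a suffix accumulator.


-- ===== PORT A =====
-- loop body of A's 'for i in range(len(defined))' (state = sentence_new, over code points)
def pvBodyA (s tb te : List Char) (defined : List (Int × Int)) (acc : List Char) (i : Int) : List Char :=
  let acc := if i = 0 then PySem.List.slice s none (some (PySem.List.pyGetD defined i (0, 0)).1) else acc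
  let acc := acc ++ ([' '] ++ tb ++ [' ']) ++
      PySem.List.slice s (some (PySem.List.pyGetD defined i (0, 0)).1) (some (PySem.List.pyGetD defined i (0, 0)).2) ++
      ([' '] ++ te ++ [' '])
  if i < (defined.length : Int) - 1 then
    acc ++ PySem.List.slice s (some (PySem.List.pyGetD defined i (0, 0)).2) (some (PySem.List.pyGetD defined (i + 1) (0, 0)).1)
  else
    acc ++ PySem.List.slice s (some (PySem.List.pyGetD defined i (0, 0)).2) none

def annotations_to_tags (sentence : String) (defined : List (Int × Int)) (tag_begin : String) (tag_end : String) : String :=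
  String.ofList ((PySem.List.pyRange 0 (defined.length : Int) 1).foldl
    (pvBodyA sentence.toList tag_begin.toList tag_end.toList defined) [])

-- ===== PORT B =====
-- loop body of B's 'for start, end in reversed(defined)' (state = (suffix, next_start))
def pvBodyB (s tb te : List Char) (st : List Char × Option Int) (p : Int × Int) : List Char × Option Int :=
  let suffix := match st.2 with
    | some n => PySem.List.slice s (some p.2) (some n) ++ st.1
    | none => st.1
  (([' '] ++ tb ++ [' ']) ++ PySem.List.slice s (some p.1) (some p.2) ++ ([' '] ++ te ++ [' ']) ++ suffix,
   some p.1)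

def annotations_to_tags_alt (sentence : String) (defined : List (Int × Int)) (tag_begin : String) (tag_end : String) : String :=
  if defined = [] then ""
  else
    let s := sentence.toList
    let st := defined.reverse.foldl (pvBodyB s tag_begin.toList tag_end.toList)
      (PySem.List.slice s (some (PySem.List.pyGetD defined (-1) (0, 0)).2) none, none)
    String.ofList (PySem.List.slice s none (some (PySem.List.pyGetD defined 0 (0, 0)).1) ++ st.1)

-- ===== PRECONDITION & SPEC =====
def Spec_annotations_to_tags (sentence : String) (defined : List (Int × Int)) (tag_begin : String) (tag_end : String) (out : String) : Prop := out = annotations_to_tags_alt sentence defined tag_begin tag_end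
instance (sentence : String) (defined : List (Int × Int)) (tag_begin : String) (tag_end : String) (out : String) : Decidable (Spec_annotations_to_tags sentence defined tag_begin tag_end out) := by unfold Spec_annotations_to_tags; infer_instance

-- ===== CLAIM (what is proved, stated in full; the proofs are below) =====
def Claim_equal_annotations_to_tags : Prop := ∀ (sentence : String) (defined : List (Int × Int)) (tag_begin : String) (tag_end : String), Dom_annotations_to_tags sentence defined tag_begin tag_end → Spec_annotations_to_tags sentence defined tag_begin tag_end (annotations_to_tags sentence defined tag_begin tag_end)

-- ===== LEMMAS AND PROOFS =====

-- gap before each pair, its tagged chunk, recurse from its end, closing with a gap to nx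
def pvH (s tb te : List Char) : Option Int → List (Int × Int) → Int → List Char
  | po, [], nx => PySem.List.slice s po (some nx)
  | po, (a, b) :: r, nx =>
      PySem.List.slice s po (some a) ++
      ([' '] ++ tb ++ [' '] ++ PySem.List.slice s (some a) (some b) ++ [' '] ++ te ++ [' ']) ++
      pvH s tb te (some b) r nx

theorem pvH_concat (s tb te : List Char) (po : Option Int) (xs : List (Int × Int)) (w : Int × Int) (nx : Int) :
    pvH s tb te po (xs ++ [w]) nx =
      pvH s tb te po xs w.1 ++
      ([' '] ++ tb ++ [' '] ++ PySem.List.slice s (some w.1) (some w.2) ++ [' '] ++ te ++ [' ']) ++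
      PySem.List.slice s (some w.2) (some nx) := by
  induction xs generalizing po with
  | nil => simp [pvH]
  | cons h t ih => cases h; simp [pvH, ih, List.append_assoc]

-- full output from an open position po (cons-structured spec both sides are matched against)
def pvFull (s tb te : List Char) : Option Int → List (Int × Int) → List Char
  | po, [] => PySem.List.slice s po none
  | po, (a, b) :: r =>
      PySem.List.slice s po (some a) ++
      ([' '] ++ tb ++ [' '] ++ PySem.List.slice s (some a) (some b) ++ [' '] ++ te ++ [' ']) ++
      pvFull s tb te (some b) r

theorem pvFull_concat (s tb te : List Char) (po : Option Int) (xs : List (Int × Int)) (l : Int × Int) :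
    pvFull s tb te po (xs ++ [l]) =
      pvH s tb te po xs l.1 ++
      ([' '] ++ tb ++ [' '] ++ PySem.List.slice s (some l.1) (some l.2) ++ [' '] ++ te ++ [' ']) ++
      PySem.List.slice s (some l.2) none := by
  induction xs generalizing po with
  | nil => cases l; simp [pvFull, pvH, List.append_assoc]
  | cons h t ih => cases h; simp [pvFull, pvH, ih, List.append_assoc]

-- partial run of A's loop over the first (xs.length) indices of xs ++ w :: rest, xs nonempty
theorem pvFoldA_partial (s tb te : List Char) (xs : List (Int × Int)) (w : Int × Int)
    (rest : List (Int × Int)) (acc : List Char) (hxs : xs ≠ []) :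
    (PySem.List.pyRange 0 (xs.length : Int) 1).foldl (pvBodyA s tb te (xs ++ w :: rest)) acc =
      pvH s tb te none xs w.1 := by
  induction xs using List.reverseRecOn generalizing w rest with
  | nil => exact absurd rfl hxs
  | append_singleton ws w' ih =>
    have hsplit : PySem.List.pyRange 0 ((ws ++ [w']).length : Int) 1 =
        PySem.List.pyRange 0 (ws.length : Int) 1 ++ [(ws.length : Int)] := by
      rw [PySem.List.pyRange_one_append 0 (ws.length : Int) ((ws ++ [w']).length : Int)
        (by positivity) (by simp)]
      congr 1
      rw [PySem.List.pyRange_one_cons (by simp)]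
      simp [PySem.List.pyRange]
    rw [hsplit, List.foldl_append]
    have hL : ws ++ [w'] ++ w :: rest = ws ++ w' :: (w :: rest) := by simp
    have hget : PySem.List.pyGetD (ws ++ [w'] ++ w :: rest) (ws.length : Int) (0, 0) = w' := by
      rw [PySem.List.pyGetD_eq_getElem _ _ (by positivity) (by simp; omega)]
      simp [List.getElem_append_right]
    have hg : ((ws.length : Int) + 1).toNat = ws.length + 1 := by omega
    have hget1 : PySem.List.pyGetD (ws ++ [w'] ++ w :: rest) ((ws.length : Int) + 1) (0, 0) = w := by
      rw [hL, PySem.List.pyGetD_eq_getElem _ _ (by positivity) (by simp),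
        List.getElem_eq_iff, hg, List.getElem?_append_right (by omega)]
      simp
    have hlt : (ws.length : Int) < ((ws ++ [w'] ++ w :: rest).length : Int) - 1 := by
      simp; omega
    cases ws with
    | nil =>
      simp only [List.nil_append, List.length_nil, Nat.cast_zero] at hget hget1 hlt ⊢
      rw [show PySem.List.pyRange (0:Int) 0 1 = [] from by simp [PySem.List.pyRange]]
      simp only [List.foldl_nil, List.foldl_cons]
      cases w'
      simp only [pvBodyA, if_pos hlt, hget, hget1]
      simp [pvH, List.append_assoc]
    | cons h t =>
      rw [hL] at hget hget1 hlt ⊢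
      rw [ih w' (w :: rest) (by simp)]
      cases w'
      simp only [List.foldl_cons, List.foldl_nil, pvBodyA]
      rw [if_neg (show ¬ (((h :: t).length : Int) = 0) from Int.natCast_ne_zero.mpr (by simp)),
        if_pos hlt, hget, hget1, pvH_concat]
      simp [List.append_assoc]

-- characterization of A's foldl on a nonempty list
theorem pvA_char (s tb te : List Char) (xs : List (Int × Int)) (l : Int × Int) :
    (PySem.List.pyRange 0 (((xs ++ [l]).length : Int)) 1).foldl (pvBodyA s tb te (xs ++ [l])) [] =
      pvH s tb te none xs l.1 ++
      ([' '] ++ tb ++ [' '] ++ PySem.List.slice s (some l.1) (some l.2) ++ [' '] ++ te ++ [' ']) ++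
      PySem.List.slice s (some l.2) none := by
  have hsplit : PySem.List.pyRange 0 (((xs ++ [l]).length : Int)) 1 =
      PySem.List.pyRange 0 (xs.length : Int) 1 ++ [(xs.length : Int)] := by
    rw [PySem.List.pyRange_one_append 0 (xs.length : Int) ((xs ++ [l]).length : Int)
      (by positivity) (by simp)]
    congr 1
    rw [PySem.List.pyRange_one_cons (by simp)]
    simp [PySem.List.pyRange]
  rw [hsplit, List.foldl_append]
  have hget : PySem.List.pyGetD (xs ++ [l]) (xs.length : Int) (0, 0) = l := by
    rw [PySem.List.pyGetD_eq_getElem _ _ (by positivity) (by simp)]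
    simp [List.getElem_append_right]
  have hnlt : ¬ ((xs.length : Int) < (((xs ++ [l]).length : Int)) - 1) := by
    simp
  cases xs with
  | nil =>
    simp only [List.nil_append, List.length_nil, Nat.cast_zero]
    rw [show PySem.List.pyRange (0:Int) 0 1 = [] from by simp [PySem.List.pyRange]]
    simp only [List.foldl_nil, List.foldl_cons]
    cases l
    simp only [pvBodyA]
    simp [pvH, PySem.List.pyGetD, List.append_assoc]
  | cons h t =>
    rw [pvFoldA_partial s tb te (h :: t) l [] [] (by simp)]
    cases l
    simp only [List.foldl_cons, List.foldl_nil, pvBodyA]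
    rw [if_neg (show ¬ (((h :: t).length : Int) = 0) from Int.natCast_ne_zero.mpr (by simp)),
      if_neg hnlt, hget]
    simp [List.append_assoc]

-- B's suffix after processing (a,b)::r right-to-left
def pvT (s tb te : List Char) : Int × Int → List (Int × Int) → List Char
  | (a, b), [] =>
      ([' '] ++ tb ++ [' ']) ++ PySem.List.slice s (some a) (some b) ++ ([' '] ++ te ++ [' ']) ++
      PySem.List.slice s (some b) none
  | (a, b), (a2, b2) :: r =>
      ([' '] ++ tb ++ [' ']) ++ PySem.List.slice s (some a) (some b) ++ ([' '] ++ te ++ [' ']) ++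
      (PySem.List.slice s (some b) (some a2) ++ pvT s tb te (a2, b2) r)

theorem pvFoldrB (s tb te : List Char) (r : List (Int × Int)) :
    ∀ (a b : Int) (w : Int × Int), ((a, b) :: r).getLastD (0, 0) = w →
    ((a, b) :: r).foldr (fun x y => pvBodyB s tb te y x)
        (PySem.List.slice s (some w.2) none, none) =
      (pvT s tb te (a, b) r, some a) := by
  induction r with
  | nil =>
    intro a b w hw
    simp at hw
    subst hw
    simp [pvBodyB, pvT]
  | cons q r' ih =>
    intro a b w hw
    cases q with
    | mk a2 b2 =>
      have hw' : ((a2, b2) :: r').getLastD (0, 0) = w := by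
        simpa using hw
      rw [List.foldr_cons, ih a2 b2 w hw']
      simp [pvBodyB, pvT]

theorem pvT_eq_pvFull (s tb te : List Char) (r : List (Int × Int)) :
    ∀ (a b : Int) (po : Option Int),
    PySem.List.slice s po (some a) ++ pvT s tb te (a, b) r = pvFull s tb te po ((a, b) :: r) := by
  induction r with
  | nil => intro a b po; simp [pvT, pvFull, List.append_assoc]
  | cons q r' ih =>
    intro a b po
    cases q with
    | mk a2 b2 =>
      rw [pvT, pvFull, ← ih a2 b2 (some b)]
      simp [List.append_assoc]

-- ===== VERDICT (by name: the statement is the Claim_ definition above) =====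
theorem annotations_to_tags_spec : Claim_equal_annotations_to_tags := by
  intro sentence defined tag_begin tag_end _
  unfold Spec_annotations_to_tags annotations_to_tags annotations_to_tags_alt
  cases defined with
  | nil =>
    simp only [List.length_nil, Nat.cast_zero]
    rw [show PySem.List.pyRange (0:Int) 0 1 = [] from by simp [PySem.List.pyRange]]
    rfl
  | cons p r =>
    rcases List.eq_nil_or_concat (p :: r) with hnil | ⟨xs, l, hcat⟩
    · simp at hnil
    · rw [if_neg (by simp)]
      congr 1
      set s := sentence.toList
      set tb := tag_begin.toList
      set te := tag_end.toList
      have hA := pvA_char s tb te xs l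
      rw [List.concat_eq_append] at hcat
      rw [← hcat] at hA
      rw [hA]
      have hlast : PySem.List.pyGetD (p :: r) (-1) (0, 0) = l := by
        rw [hcat]; exact PySem.List.pyGetD_neg_one_append_singleton xs l (0, 0)
      have hgl : ((p :: r).getLastD (0, 0)) = l := by
        rw [hcat]; simp
      rw [hlast, List.foldl_reverse, PySem.List.pyGetD_zero_cons,
        pvFoldrB s tb te r p.1 p.2 l (by simpa using hgl)]
      have heq := pvT_eq_pvFull s tb te r p.1 p.2 none
      simp only at heq
      rw [heq]
      have h2 : ((p.1, p.2) :: r : List (Int × Int)) = p :: r := by simp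
      rw [h2, hcat, pvFull_concat]
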